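-- pv_equiv track=rewrite | github.com/ajoudaki/CITER | rule_based_extract_lemma_theorems.py | remove_inline_comments
-- ===== SOURCE A (Python) =====
-- from typing import Dict, List, Optional, Set, Tuple
--
-- def remove_inline_comments(text: str) -> str:
--     r"""Remove unescaped % comments line-by-line."""
--     out_lines: List[str] = []
--     for line in text.splitlines():
--         i = 0
--         cut = len(line)
--         while i < len(line):
--             if line[i] == "%":
--                 if i == 0 or line[i - 1] != "\\":
--                     cut = i
--                     break
--             i += 1
--         out_lines.append(line[:cut])
--     return "\n".join(out_lines)
-- ===== SOURCE B (Python) =====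
-- from typing import List
--
-- def remove_inline_comments(text: str) -> str:
--     r"""Remove unescaped % comments line-by-line (split-on-% and conditional rejoin)."""
--     out_lines: List[str] = []
--     for line in text.splitlines():
--         parts = line.split("%")
--         acc = parts[0]
--         for part in parts[1:]:
--             if acc.endswith("\\"):
--                 acc += "%" + part
--             else:
--                 break
--         out_lines.append(acc)
--     return "\n".join(out_lines)
-- ===== Notes on version B (the rewrite author's own statement) =====
-- stated objective: faster
-- what changed: Replaces the per-line character-by-character positional while-scan (index i, cut, break) with a split on the percent delimiter followed by a conditional rejoin fold that re-glues escaped parts and stops at the first unescaped delimiter.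
import Mathlib
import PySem

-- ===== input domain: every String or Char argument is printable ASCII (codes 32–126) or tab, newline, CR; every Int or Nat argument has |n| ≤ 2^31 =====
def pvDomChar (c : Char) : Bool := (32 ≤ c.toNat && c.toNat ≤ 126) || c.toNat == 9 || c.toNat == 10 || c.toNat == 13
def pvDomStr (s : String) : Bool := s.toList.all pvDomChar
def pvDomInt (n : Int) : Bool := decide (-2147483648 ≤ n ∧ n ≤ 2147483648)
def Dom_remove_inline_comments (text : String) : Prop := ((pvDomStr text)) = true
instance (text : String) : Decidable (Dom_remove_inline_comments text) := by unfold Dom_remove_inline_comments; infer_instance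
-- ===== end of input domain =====

-- B replaces A's per-line positional character scan by a split on the percent delimiter
-- plus a conditional rejoin fold (objective: faster, measured constant-factor).

-- ===== PORT A =====
-- the while loop: returns the final `cut` (line[i-1] is exact as getD since the branch
-- is only reached with 1 ≤ i < line.length)
def pvCutA (line : List Char) (i : Nat) : Nat :=
  if i < line.length then
    if line.getD i ' ' = '%' ∧ (i = 0 ∨ line.getD (i - 1) ' ' ≠ '\\') then i
    else pvCutA line (i + 1)
  else line.length
termination_by line.length - i

def remove_inline_comments (text : String) : String :=
  -- line[:cut] with 0 ≤ cut is List.take cut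
  PySem.Str.join "\n" ((PySem.Str.splitlines text).map (fun line =>
    String.ofList ((line.toList).take (pvCutA line.toList 0))))

-- ===== PORT B =====
-- the inner for-loop over parts[1:] with its break (acc.endswith("\\"))
def pvRejoinB (acc : List Char) (parts : List (List Char)) : List Char :=
  match parts with
  | [] => acc
  | p :: rest =>
    if PySem.Chars.endswith acc ['\\'] then pvRejoinB (acc ++ '%' :: p) rest else acc

def remove_inline_comments_alt (text : String) : String :=
  -- line.split("%") with a one-char separator is List.splitOn '%'
  PySem.Str.join "\n" ((PySem.Str.splitlines text).map (fun line =>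
    let parts := (line.toList).splitOn '%'
    String.ofList (pvRejoinB (parts.headD []) parts.tail)))

-- ===== PRECONDITION & SPEC =====
def Spec_remove_inline_comments (text : String) (out : String) : Prop := out = remove_inline_comments_alt text
instance (text : String) (out : String) : Decidable (Spec_remove_inline_comments text out) := by unfold Spec_remove_inline_comments; infer_instance

-- ===== CLAIM (what is proved, stated in full; the proofs are below) =====
def Claim_equal_remove_inline_comments : Prop := ∀ (text : String), Dom_remove_inline_comments text → Spec_remove_inline_comments text (remove_inline_comments text)

-- ===== LEMMAS AND PROOFS =====

-- reference function: keep chars until the first '%' not preceded by '\\' (prev = char before)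
def pvG (prev : Char) : List Char → List Char
  | [] => []
  | c :: rest => if c = '%' ∧ prev ≠ '\\' then [] else c :: pvG c rest

theorem pvCutA_ge (line : List Char) (i : Nat) (h : i ≤ line.length) : i ≤ pvCutA line i := by
  rw [pvCutA]
  split
  · split
    · omega
    · have := pvCutA_ge line (i + 1) (by omega)
      omega
  · omega
termination_by line.length - i

theorem takeA_eq (cs : List Char) (i : Nat) (h : i ≤ cs.length) :
    (cs.drop i).take (pvCutA cs i - i)
      = pvG (if i = 0 then ' ' else cs.getD (i - 1) ' ') (cs.drop i) := by
  rw [pvCutA]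
  by_cases hlt : i < cs.length
  · rw [if_pos hlt, List.drop_eq_getElem_cons hlt]
    have hgetD : cs.getD i ' ' = cs[i] := by
      simp [List.getD_eq_getElem?_getD, List.getElem?_eq_getElem hlt]
    by_cases hcut : cs.getD i ' ' = '%' ∧ (i = 0 ∨ cs.getD (i - 1) ' ' ≠ '\\')
    · rw [if_pos hcut]
      have hz : (i - i) = 0 := by omega
      rw [hz, List.take_zero, pvG]
      rw [if_pos]
      refine ⟨by rw [← hgetD]; exact hcut.1, ?_⟩
      rcases hcut.2 with h0 | hne
      · simp [h0]
      · split
        · decide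
        · exact hne
    · rw [if_neg hcut]
      have hge := pvCutA_ge cs (i + 1) (by omega)
      have hsub : pvCutA cs (i + 1) - i = (pvCutA cs (i + 1) - (i + 1)) + 1 := by omega
      rw [hsub, List.take_succ_cons]
      have ih := takeA_eq cs (i + 1) (by omega)
      rw [if_neg (by omega)] at ih
      simp only [Nat.add_sub_cancel] at ih
      have hneg : ¬ (cs[i] = '%' ∧ (if i = 0 then ' ' else cs.getD (i - 1) ' ') ≠ '\\') := by
        intro hcon
        apply hcut
        rw [hgetD]
        refine ⟨hcon.1, ?_⟩
        by_cases h0 : i = 0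
        · exact Or.inl h0
        · refine Or.inr ?_
          have h2 := hcon.2
          rw [if_neg h0] at h2
          exact h2
      rw [pvG, if_neg hneg, ih, hgetD]
  · rw [if_neg hlt]
    have hi : i = cs.length := by omega
    subst hi
    simp [pvG]
termination_by cs.length - i

theorem endswith_backslash (acc : List Char) :
    PySem.Chars.endswith acc ['\\'] = true ↔ acc.getLastD ' ' = '\\' := by
  rw [PySem.Chars.endswith_iff]
  induction acc using List.reverseRecOn with
  | nil =>
    constructor
    · intro h
      exact absurd (List.eq_nil_of_suffix_nil h) (by simp)
    · intro h
      exact absurd h (by decide)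
  | append_singleton xs b _ =>
    rw [List.getLastD_concat]
    constructor
    · intro h
      rcases h with ⟨t, ht⟩
      have h2 := congrArg List.getLast? ht
      simpa [List.getLast?_concat] using h2.symm
    · intro h
      exact ⟨xs, by rw [h]⟩

theorem rejoin_eq (cs : List Char) : ∀ (acc : List Char),
    pvRejoinB (acc ++ (cs.splitOn '%').headD []) (cs.splitOn '%').tail
      = acc ++ pvG (acc.getLastD ' ') cs := by
  induction cs with
  | nil =>
    intro acc
    simp [List.splitOn, List.splitOnP_nil, pvRejoinB, pvG]
  | cons c cs ih =>
    intro acc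
    simp only [List.splitOn] at ih ⊢
    rw [List.splitOnP_cons]
    rcases hs : cs.splitOnP (· == '%') with _ | ⟨s0, s'⟩
    · exact absurd hs (List.splitOnP_ne_nil _ cs)
    · by_cases hc : c = '%'
      · subst hc
        rw [if_pos (by simp)]
        simp only [List.headD_cons, List.tail_cons, List.append_nil]
        rw [pvRejoinB]
        by_cases hb : PySem.Chars.endswith acc ['\\'] = true
        · rw [if_pos hb]
          have hprev := (endswith_backslash acc).mp hb
          have h2 := ih (acc ++ ['%'])
          rw [hs] at h2
          simp only [List.headD_cons, List.tail_cons] at h2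
          rw [show acc ++ '%' :: s0 = (acc ++ ['%']) ++ s0 by simp, h2, List.getLastD_concat]
          rw [pvG, if_neg (fun hcon => hcon.2 hprev)]
          simp
        · rw [if_neg hb]
          have hprev : ¬ acc.getLastD ' ' = '\\' := fun h => hb ((endswith_backslash acc).mpr h)
          rw [pvG, if_pos ⟨rfl, hprev⟩]
          simp
      · rw [if_neg (by simpa using hc)]
        simp only [List.modifyHead_cons, List.headD_cons, List.tail_cons]
        have h2 := ih (acc ++ [c])
        rw [hs] at h2
        simp only [List.headD_cons, List.tail_cons] at h2
        rw [show acc ++ c :: s0 = (acc ++ [c]) ++ s0 by simp, h2, List.getLastD_concat]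
        rw [pvG, if_neg (by simp [hc])]
        simp

-- ===== VERDICT (by name: the statement is the Claim_ definition above) =====
theorem remove_inline_comments_spec : Claim_equal_remove_inline_comments := by
  intro text _
  unfold Spec_remove_inline_comments remove_inline_comments remove_inline_comments_alt
  congr 1
  apply List.map_congr_left
  intro line _
  congr 1
  have h1 := takeA_eq line.toList 0 (by omega)
  rw [if_pos rfl] at h1
  simp only [List.drop_zero, Nat.sub_zero] at h1
  have h2 := rejoin_eq line.toList []
  simp only [List.nil_append, List.getLastD_nil] at h2
  rw [h1, ← h2]
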